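-- pv_equiv track=rewrite | github.com/mycmon/Universal_Scaling_Law_for_Safe_Prime | Validation_loi_p-k_Constellations de premiers.py | valid_residue_count
-- ===== SOURCE A (Python) =====
-- from math import gcd
--
-- def valid_residue_count(M, offsets):
--     """
--     Compte le nombre de résidus r mod M tels que
--     pour tout offset c dans offsets, r + c est copremier avec M.
--     """
--     count = 0
--     for r in range(M):
--         ok = True
--         for c in offsets:
--             if gcd(r + c, M) != 1:
--                 ok = False
--                 break
--         if ok:
--             count += 1
--     return count
-- ===== SOURCE B (Python) =====
-- from math import gcd
--
-- def valid_residue_count(M, offsets):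
--     """
--     Compte le nombre de résidus r mod M tels que
--     pour tout offset c dans offsets, r + c est copremier avec M.
--     Complement counting: a residue r is invalid iff r = (t - c) % M for some
--     offset c and some t in [0, M) with gcd(t, M) != 1; answer = M - |forbidden|.
--     """
--     if M <= 0:
--         return 0
--     bad = [t for t in range(M) if gcd(t, M) != 1]
--     forbidden = set()
--     for c in offsets:
--         for t in bad:
--             forbidden.add((t - c) % M)
--     return M - len(forbidden)
-- ===== Notes on version B (the rewrite author's own statement) =====
-- stated objective: alternative
-- what changed: B counts the complement: it builds the set of non-coprime residues once, shifts it by each offset to collect the forbidden residues, and returns M minus the size of that union, instead of testing every residue against every offset with gcd.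
import Mathlib
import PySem

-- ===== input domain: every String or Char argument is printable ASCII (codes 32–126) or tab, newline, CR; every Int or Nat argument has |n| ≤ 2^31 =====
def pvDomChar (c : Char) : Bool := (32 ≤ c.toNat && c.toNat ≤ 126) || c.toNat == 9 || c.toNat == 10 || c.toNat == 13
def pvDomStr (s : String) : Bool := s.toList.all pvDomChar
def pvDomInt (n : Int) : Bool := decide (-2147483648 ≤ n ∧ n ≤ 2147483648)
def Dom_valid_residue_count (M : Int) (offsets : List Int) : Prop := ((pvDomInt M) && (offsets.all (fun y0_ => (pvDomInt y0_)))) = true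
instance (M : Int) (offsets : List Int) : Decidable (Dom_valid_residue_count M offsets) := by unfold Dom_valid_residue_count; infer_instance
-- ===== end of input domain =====

-- B replaces A's per-residue gcd scan by complement counting (shift the non-coprime
-- residue set by each offset, answer = M - |forbidden union|); objective: alternative.

-- ===== PORT A =====
-- inner 'for c in offsets: if gcd(r+c,M)!=1: ok=False; break'
def vrcOk (M : Int) (r : Int) : List Int → Bool
  | [] => true
  | c :: cs => if Int.gcd (r + c) M ≠ 1 then false else vrcOk M r cs

def valid_residue_count (M : Int) (offsets : List Int) : Int :=
  (PySem.List.pyRange 0 M 1).foldl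
    (fun count r => if vrcOk M r offsets then count + 1 else count) 0

-- ===== PORT B =====
def valid_residue_count_alt (M : Int) (offsets : List Int) : Int :=
  if M ≤ 0 then 0
  else
    let bad := (PySem.List.pyRange 0 M 1).filter (fun t => Int.gcd t M ≠ 1)
    let forbidden : PySem.Set Int :=
      offsets.foldl
        (fun s c => bad.foldl (fun s t => PySem.Set.add s (PySem.Int.mod (t - c) M)) s)
        PySem.Set.empty
    M - PySem.Set.len forbidden

-- ===== PRECONDITION & SPEC =====
def Spec_valid_residue_count (M : Int) (offsets : List Int) (out : Int) : Prop := out = valid_residue_count_alt M offsets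
instance (M : Int) (offsets : List Int) (out : Int) : Decidable (Spec_valid_residue_count M offsets out) := by unfold Spec_valid_residue_count; infer_instance

-- ===== CLAIM (what is proved, stated in full; the proofs are below) =====
def Claim_equal_valid_residue_count : Prop := ∀ (M : Int) (offsets : List Int), Dom_valid_residue_count M offsets → Spec_valid_residue_count M offsets (valid_residue_count M offsets)

-- ===== LEMMAS AND PROOFS =====

-- vrcOk tests "all offsets give gcd 1"
theorem vrcOk_iff (M r : Int) (cs : List Int) :
    vrcOk M r cs = true ↔ ∀ c ∈ cs, Int.gcd (r + c) M = 1 := by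
  induction cs with
  | nil => simp [vrcOk]
  | cons c cs ih => by_cases h : Int.gcd (r + c) M = 1 <;> simp [vrcOk, h, ih]

-- membership in an inner fold of Set.add
theorem mem_foldl_add_map (f : Int → Int) (l : List Int) (s : PySem.Set Int) (x : Int) :
    x ∈ l.foldl (fun s t => PySem.Set.add s (f t)) s ↔ x ∈ s ∨ ∃ t ∈ l, x = f t := by
  induction l generalizing s with
  | nil => simp
  | cons a l ih =>
    simp only [List.foldl_cons, ih, PySem.Set.mem_add, List.mem_cons]
    constructor
    · rintro (⟨h | h⟩ | ⟨t, ht, rfl⟩)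
      · exact Or.inl h
      · exact Or.inr ⟨a, Or.inl rfl, h⟩
      · exact Or.inr ⟨t, Or.inr ht, rfl⟩
    · rintro (h | ⟨t, (rfl | ht), rfl⟩)
      · exact Or.inl (Or.inl h)
      · exact Or.inl (Or.inr rfl)
      · exact Or.inr ⟨t, ht, rfl⟩

theorem nodup_foldl_add_map (f : Int → Int) (l : List Int) (s : PySem.Set Int)
    (hs : s.Nodup) : (l.foldl (fun s t => PySem.Set.add s (f t)) s).Nodup := by
  induction l generalizing s with
  | nil => exact hs
  | cons a l ih => exact ih _ (PySem.Set.nodup_add s (f a) hs)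

-- membership in the outer double fold
theorem mem_forbidden_fold (M : Int) (offsets bad : List Int) (s : PySem.Set Int) (x : Int) :
    x ∈ offsets.foldl
        (fun s c => bad.foldl (fun s t => PySem.Set.add s (PySem.Int.mod (t - c) M)) s) s ↔
      x ∈ s ∨ ∃ c ∈ offsets, ∃ t ∈ bad, x = PySem.Int.mod (t - c) M := by
  induction offsets generalizing s with
  | nil => simp
  | cons c cs ih =>
    simp only [List.foldl_cons, ih, mem_foldl_add_map, List.mem_cons]
    constructor
    · rintro (⟨h | ⟨t, ht, rfl⟩⟩ | ⟨c', hc', t, ht, rfl⟩)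
      · exact Or.inl h
      · exact Or.inr ⟨c, Or.inl rfl, t, ht, rfl⟩
      · exact Or.inr ⟨c', Or.inr hc', t, ht, rfl⟩
    · rintro (h | ⟨c', (rfl | hc'), t, ht, rfl⟩)
      · exact Or.inl (Or.inl h)
      · exact Or.inl (Or.inr ⟨t, ht, rfl⟩)
      · exact Or.inr ⟨c', hc', t, ht, rfl⟩

theorem nodup_forbidden_fold (M : Int) (offsets bad : List Int) (s : PySem.Set Int)
    (hs : s.Nodup) :
    (offsets.foldl
        (fun s c => bad.foldl (fun s t => PySem.Set.add s (PySem.Int.mod (t - c) M)) s) s).Nodup := by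
  induction offsets generalizing s with
  | nil => exact hs
  | cons c cs ih => exact ih _ (nodup_foldl_add_map _ _ _ hs)

-- arithmetic helpers
theorem emod_sub_left (a c M : Int) : (a % M - c) % M = (a - c) % M := by
  conv_lhs => rw [Int.sub_emod]
  conv_rhs => rw [Int.sub_emod]
  rw [Int.emod_emod_of_dvd _ dvd_rfl]

theorem emod_add_left (a c M : Int) : (a % M + c) % M = (a + c) % M := by
  conv_lhs => rw [Int.add_emod]
  conv_rhs => rw [Int.add_emod]
  rw [Int.emod_emod_of_dvd _ dvd_rfl]

-- the forbidden set is exactly the residues in [0,M) that fail A's test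
theorem forbidden_iff (M : Int) (hM : 0 < M) (offsets : List Int) (x : Int) :
    (∃ c ∈ offsets, ∃ t ∈ (PySem.List.pyRange 0 M 1).filter (fun t => Int.gcd t M ≠ 1),
        x = PySem.Int.mod (t - c) M) ↔
      (0 ≤ x ∧ x < M) ∧ ¬ (∀ c ∈ offsets, Int.gcd (x + c) M = 1) := by
  have hMne : M ≠ 0 := by omega
  constructor
  · rintro ⟨c, hc, t, ht, rfl⟩
    simp only [List.mem_filter, PySem.List.mem_pyRange_one, decide_not, Bool.not_eq_true',
      decide_eq_false_iff_not] at ht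
    obtain ⟨⟨ht0, htM⟩, hgcd⟩ := ht
    rw [PySem.Int.mod_eq_emod_of_pos hM]
    refine ⟨⟨Int.emod_nonneg _ hMne, Int.emod_lt_of_pos _ hM⟩, ?_⟩
    intro hall
    have := hall c hc
    rw [← Int.gcd_emod ((t - c) % M + c) M, emod_add_left, sub_add_cancel,
      Int.emod_eq_of_lt ht0 htM] at this
    exact hgcd this
  · rintro ⟨⟨hx0, hxM⟩, hfail⟩
    push Not at hfail
    obtain ⟨c, hc, hgcd⟩ := hfail
    refine ⟨c, hc, (x + c) % M, ?_, ?_⟩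
    · simp only [List.mem_filter, PySem.List.mem_pyRange_one, decide_not, Bool.not_eq_true',
        decide_eq_false_iff_not]
      exact ⟨⟨Int.emod_nonneg _ hMne, Int.emod_lt_of_pos _ hM⟩,
        by rw [Int.gcd_emod]; exact hgcd⟩
    · rw [PySem.Int.mod_eq_emod_of_pos hM, emod_sub_left, add_sub_cancel_right,
        Int.emod_eq_of_lt hx0 hxM]

-- ===== VERDICT (by name: the statement is the Claim_ definition above) =====
theorem valid_residue_count_spec : Claim_equal_valid_residue_count := by
  intro M offsets _
  unfold Spec_valid_residue_count valid_residue_count valid_residue_count_alt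
  by_cases hM : M ≤ 0
  · simp [hM, PySem.List.pyRange_one_eq_nil hM]
  · have hMpos : 0 < M := by omega
    simp only [hM, if_false]
    rw [PySem.List.foldl_count_if, zero_add]
    set bad := (PySem.List.pyRange 0 M 1).filter (fun t => Int.gcd t M ≠ 1) with hbad
    set F := offsets.foldl
        (fun s c => bad.foldl (fun s t => PySem.Set.add s (PySem.Int.mod (t - c) M)) s)
        PySem.Set.empty with hF
    -- F is a permutation of the residues in range failing A's test
    have hmemF : ∀ x, x ∈ F ↔ x ∈ (PySem.List.pyRange 0 M 1).filter
        (fun r => !vrcOk M r offsets) := by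
      intro x
      rw [hF, mem_forbidden_fold]
      simp only [PySem.Set.empty, List.not_mem_nil, false_or, List.mem_filter,
        PySem.List.mem_pyRange_one, Bool.not_eq_eq_eq_not, Bool.not_true]
      rw [forbidden_iff M hMpos]
      constructor
      · rintro ⟨hx, hfail⟩
        refine ⟨hx, ?_⟩
        rcases h : vrcOk M x offsets with _ | _
        · rfl
        · exact absurd ((vrcOk_iff M x offsets).mp h) hfail
      · rintro ⟨hx, hok⟩
        refine ⟨hx, fun hall => ?_⟩
        rw [(vrcOk_iff M x offsets).mpr hall] at hok
        exact Bool.true_eq_false.mp hok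
    have hperm : F.Perm ((PySem.List.pyRange 0 M 1).filter (fun r => !vrcOk M r offsets)) :=
      (List.perm_ext_iff_of_nodup (nodup_forbidden_fold _ _ _ _ List.nodup_nil)
        ((PySem.List.nodup_pyRange_one 0 M).filter _)).mpr hmemF
    have hlen : PySem.Set.len F =
        (((PySem.List.pyRange 0 M 1).filter (fun r => !vrcOk M r offsets)).length : Int) := by
      show (F.length : Int) = _
      rw [hperm.length_eq]
    rw [hlen]
    -- countP p + length (filter ¬p) = length = M
    have hsplit := (List.filter_append_perm (fun r => vrcOk M r offsets)
      (PySem.List.pyRange 0 M 1)).length_eq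
    rw [List.length_append, PySem.List.length_pyRange_one] at hsplit
    rw [List.countP_eq_length_filter]
    omega
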